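-- pv_equiv track=rewrite | github.com/t0r1n88/Lachesis | mental_state/shmelev_osr_razuvaeva.py | calc_value_n
-- ===== SOURCE A (Python) =====
-- def calc_value_n(row):
--     """
--     Функция для подсчета значения
--     :return: число
--     """
--     lst_pr = [2,3,6,7,17]
--     value_forward = 0  # результат
--     for idx, value in enumerate(row,1):
--         if idx in lst_pr:
--             if value == 1:
--                 value_forward += 1
--
--     return value_forward
-- ===== SOURCE B (Python) =====
-- def calc_value_n(row):
--     """
--     Функция для подсчета значения
--     :return: число
--     """
--     return sum(1 for p in (1, 2, 5, 6, 16) if p < len(row) and row[p] == 1)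
-- ===== Notes on version B (the rewrite author's own statement) =====
-- stated objective: faster
-- what changed: Instead of scanning the whole row with enumerate and a membership test against the constant position list, B looks up the five fixed 0-based positions directly and counts those in range that hold 1.
import Mathlib
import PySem

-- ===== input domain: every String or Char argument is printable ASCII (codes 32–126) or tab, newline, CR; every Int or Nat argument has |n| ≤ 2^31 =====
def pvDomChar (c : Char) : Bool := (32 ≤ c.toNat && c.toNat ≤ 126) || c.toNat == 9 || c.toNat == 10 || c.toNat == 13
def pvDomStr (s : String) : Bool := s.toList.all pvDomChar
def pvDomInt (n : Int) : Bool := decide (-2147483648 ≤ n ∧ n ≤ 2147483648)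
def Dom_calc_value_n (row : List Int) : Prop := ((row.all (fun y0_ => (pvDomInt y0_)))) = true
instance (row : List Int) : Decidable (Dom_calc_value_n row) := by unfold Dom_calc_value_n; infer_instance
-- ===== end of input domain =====

-- B replaces A's full scan of the row (enumerate + membership test) with direct lookups of
-- the five fixed positions; return value only, equal on every input.

-- ===== PORT A =====
-- A's for-loop over enumerate(row, 1): structural recursion carrying the 1-based index and the accumulator.
def calcLoopA : List Int → Nat → Int → Int
  | [], _, acc => acc
  | v :: r, idx, acc =>
      calcLoopA r (idx + 1)
        (if idx ∈ ([2, 3, 6, 7, 17] : List Nat) then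
           if v = 1 then acc + 1 else acc
         else acc)

def calc_value_n (row : List Int) : Int := calcLoopA row 1 0

-- ===== PORT B =====
-- B: count, over the constant 0-based positions, those in range holding 1.
def calc_value_n_alt (row : List Int) : Int :=
  (([1, 2, 5, 6, 16] : List Nat).countP
      (fun p => decide (p < row.length) && (row[p]? == some 1)) : Int)

-- ===== PRECONDITION & SPEC =====
def Spec_calc_value_n (row : List Int) (out : Int) : Prop := out = calc_value_n_alt row
instance (row : List Int) (out : Int) : Decidable (Spec_calc_value_n row out) := by unfold Spec_calc_value_n; infer_instance

-- ===== CLAIM (what is proved, stated in full; the proofs are below) =====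
def Claim_equal_calc_value_n : Prop := ∀ (row : List Int), Dom_calc_value_n row → Spec_calc_value_n row (calc_value_n row)

-- ===== LEMMAS AND PROOFS =====

/-- 0/1 indicator: position `p` (1-based, relative start index `i`) of `row` holds 1. -/
def indAt (row : List Int) (i p : Nat) : Int :=
  if i ≤ p ∧ row[p - i]? = some 1 then 1 else 0

theorem indAt_nil (i p : Nat) : indAt [] i p = 0 := by
  simp [indAt]

theorem indAt_cons (v : Int) (r : List Int) (i p : Nat) :
    indAt (v :: r) i p = (if i = p ∧ v = 1 then 1 else 0) + indAt r (i + 1) p := by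
  unfold indAt
  rcases Nat.lt_trichotomy i p with h | h | h
  · have h1 : p - i = (p - (i + 1)) + 1 := by omega
    simp [h1, Nat.ne_of_lt h, Nat.le_of_lt h, h]
  · subst h
    simp
  · have : ¬ i ≤ p := by omega
    simp [this, Nat.ne_of_gt h, show ¬ i + 1 ≤ p by omega]

theorem calcLoopA_eq (row : List Int) :
    ∀ (i : Nat) (acc : Int),
      calcLoopA row i acc =
        acc + indAt row i 2 + indAt row i 3 + indAt row i 6 + indAt row i 7 + indAt row i 17 := by
  induction row with
  | nil => intro i acc; simp [calcLoopA, indAt_nil]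
  | cons v r ih =>
      intro i acc
      simp only [calcLoopA, ih, indAt_cons, List.mem_cons, List.not_mem_nil, or_false]
      split_ifs <;> first | linarith | (exfalso; omega)

theorem indAt_one_succ (row : List Int) (p : Nat) :
    indAt row 1 (p + 1) = if row[p]? = some 1 then 1 else 0 := by
  simp [indAt]

theorem countP_term (row : List Int) (p : Nat) :
    (decide (p < row.length) && (row[p]? == some 1)) =
      decide (row[p]? = some 1) := by
  by_cases hl : p < row.length
  · simp [hl, Bool.beq_eq_decide_eq]
  · have hn : row[p]? = none := ((none_eq_getElem?_iff row p).mpr hl).symm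
    simp [hl]

theorem alt_eq (row : List Int) :
    calc_value_n_alt row =
      indAt row 1 2 + indAt row 1 3 + indAt row 1 6 + indAt row 1 7 + indAt row 1 17 := by
  unfold calc_value_n_alt
  simp only [List.countP_cons, List.countP_nil, countP_term, decide_eq_true_eq]
  have h2 := indAt_one_succ row 1
  have h3 := indAt_one_succ row 2
  have h6 := indAt_one_succ row 5
  have h7 := indAt_one_succ row 6
  have h17 := indAt_one_succ row 16
  simp only [show (1:Nat)+1 = 2 from rfl, show (2:Nat)+1 = 3 from rfl,
    show (5:Nat)+1 = 6 from rfl, show (6:Nat)+1 = 7 from rfl,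
    show (16:Nat)+1 = 17 from rfl] at h2 h3 h6 h7 h17
  rw [h2, h3, h6, h7, h17]
  split_ifs <;> norm_num

-- ===== VERDICT (by name: the statement is the Claim_ definition above) =====
theorem calc_value_n_spec : Claim_equal_calc_value_n := by
  intro row _
  show calc_value_n row = calc_value_n_alt row
  rw [calc_value_n, calcLoopA_eq, alt_eq]
  ring
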